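-- pv_equiv track=rewrite | github.com/tzickel/electra_remote_ir | ir/read.py | find_changes_region
-- ===== SOURCE A (Python) =====
-- def find_changes_region(seqs):
--     first = None
--     for i, j in enumerate(zip(*seqs)):
--         if len(set(j)) != 1:
--             first = i
--             break
--     if first is None:
--         raise Exception('All sequences are the same')
--     last = None
--     for i, j in enumerate(list(zip(*seqs))[::-1]):
--         if len(set(j)) != 1:
--             last = len(seqs[0]) - i
--             break
--     return first, last, [x[first:last] for x in seqs]
-- ===== SOURCE B (Python) =====
-- def find_changes_region(seqs):
--     ref = seqs[0]
--     m = min(len(s) for s in seqs)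
--     first = None
--     last = None
--     for s in seqs[1:]:
--         for i in range(m):
--             if s[i] != ref[i]:
--                 if first is None or i < first:
--                     first = i
--                 if last is None or i > last:
--                     last = i
--     if first is None:
--         raise Exception('All sequences are the same')
--     cut = len(ref) - (m - 1 - last)
--     return first, cut, [x[first:cut] for x in seqs]
-- ===== Notes on version B (the rewrite author's own statement) =====
-- stated objective: alternative
-- what changed: B never transposes and builds no sets: it compares each row element-wise against the reference row seqs[0], maintaining a running min/max of differing indices in one row-major pass, instead of A's column-wise zip(*seqs) with per-column set() tests and two directional scans with early break
import Mathlib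
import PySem

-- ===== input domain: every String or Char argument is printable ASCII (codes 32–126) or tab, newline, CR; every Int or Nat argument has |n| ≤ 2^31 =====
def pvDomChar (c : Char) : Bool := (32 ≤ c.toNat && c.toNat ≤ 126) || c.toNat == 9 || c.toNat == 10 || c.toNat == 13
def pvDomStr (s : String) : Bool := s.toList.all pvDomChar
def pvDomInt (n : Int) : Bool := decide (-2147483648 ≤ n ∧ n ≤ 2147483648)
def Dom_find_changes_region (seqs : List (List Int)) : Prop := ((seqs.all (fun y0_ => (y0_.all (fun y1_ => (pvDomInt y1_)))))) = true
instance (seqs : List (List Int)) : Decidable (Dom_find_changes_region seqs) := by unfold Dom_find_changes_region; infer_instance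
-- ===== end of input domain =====

-- One honest line: B compares every row element-wise against the reference row seqs[0],
-- tracking the running min/max differing index in one row-major pass, instead of A's
-- column-wise zip(*seqs) with per-column set() tests and two directional early-break scans.

-- ===== PORT A =====
-- min length of the sequences (0 for no sequences): the length of zip(*seqs)
def pvMinLen (seqs : List (List Int)) : Nat :=
  match seqs with
  | [] => 0
  | s :: r => r.foldl (fun m t => if t.length < m then t.length else m) s.length  -- min(m, len(t)), kernel-reducible

-- zip(*seqs) as a list of columns; exact: i < pvMinLen seqs ≤ every length, so getD never defaults
def pvZipStar (seqs : List (List Int)) : List (List Int) :=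
  (List.range (pvMinLen seqs)).map (fun i => seqs.map (fun s => s.getD i 0))

-- A's directional loop: first index k+position with len(set(column)) != 1, early break
def pvScan (cs : List (List Int)) (k : Int) : Option Int :=
  match cs with
  | [] => none
  | c :: r => if PySem.Set.len (PySem.Set.ofList c) != 1 then some k else pvScan r (k + 1)

def find_changes_region (seqs : List (List Int)) : Int × Int × List (List Int) :=
  let cols := pvZipStar seqs
  match pvScan cols 0 with
  | none => (0, 0, [])  -- Python: raise Exception('All sequences are the same'); excluded by Pre_
  | some first =>
    -- second loop over list(zip(*seqs))[::-1] (= cols.reverse)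
    let last : Int :=
      match pvScan cols.reverse 0 with
      | none => 0  -- Python's last would stay None; unreachable once the first loop hit
      | some i => ((seqs.headD []).length : Int) - i
    (first, last, seqs.map (fun x => PySem.List.slice x (some first) (some last)))

-- ===== PORT B =====
-- B's inner loop: for i in range(m): if s[i] != ref[i]: update the running (first, last)
def pvInner (ref s : List Int) (m : Nat) (fl : Option Int × Option Int) : Option Int × Option Int :=
  (List.range m).foldl (fun fl i =>
    if s.getD i 0 != ref.getD i 0 then
      ((match fl.1 with
        | none => some (i : Int)
        | some f => if (i : Int) < f then some (i : Int) else some f),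
       (match fl.2 with
        | none => some (i : Int)
        | some l => if (i : Int) > l then some (i : Int) else some l))
    else fl) fl

def find_changes_region_alt (seqs : List (List Int)) : Int × Int × List (List Int) :=
  let ref := seqs.headD []          -- seqs[0]; Python raises IndexError on []: excluded by Pre_
  let m := pvMinLen seqs            -- min(len(s) for s in seqs)
  let fl := (seqs.tailD []).foldl (fun fl s => pvInner ref s m fl) (none, none)  -- for s in seqs[1:]
  match fl.1, fl.2 with
  | some first, some last =>
    let cut : Int := (ref.length : Int) - ((m : Int) - 1 - last)
    (first, cut, seqs.map (fun x => PySem.List.slice x (some first) (some cut)))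
  | _, _ => (0, 0, [])  -- Python: raise Exception('All sequences are the same'); excluded by Pre_

-- ===== PRECONDITION & SPEC =====
-- Pre_ excludes exactly the inputs on which Python A raises (no column within the common
-- zip length contains two different values, including empty seqs); Python B also raises
-- on every such input, so no value of A is excluded.
def Pre_find_changes_region (seqs : List (List Int)) : Prop :=
  ∃ i ∈ List.range (pvMinLen seqs), ∃ s ∈ seqs, s.getD i 0 ≠ (seqs.headD []).getD i 0
instance (seqs : List (List Int)) : Decidable (Pre_find_changes_region seqs) := by
  unfold Pre_find_changes_region; infer_instance
def pvWitness_find_changes_region : List (List Int) := [[1, 2, 3], [1, 5, 3]]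

def Spec_find_changes_region (seqs : List (List Int)) (out : Int × Int × List (List Int)) : Prop := out = find_changes_region_alt seqs
instance (seqs : List (List Int)) (out : Int × Int × List (List Int)) : Decidable (Spec_find_changes_region seqs out) := by unfold Spec_find_changes_region; infer_instance

-- ===== CLAIM (what is proved, stated in full; the proofs are below) =====
def Claim_equal_find_changes_region : Prop := ∀ (seqs : List (List Int)), Dom_find_changes_region seqs → Pre_find_changes_region seqs → Spec_find_changes_region seqs (find_changes_region seqs)

-- ===== LEMMAS AND PROOFS =====

-- A-side bookkeeping: list of all differing column indices (proof-side helper only)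
def pvCollect (cs : List (List Int)) (k : Int) : List Int :=
  match cs with
  | [] => []
  | c :: r =>
    if PySem.Set.len (PySem.Set.ofList c) != 1 then k :: pvCollect r (k + 1)
    else pvCollect r (k + 1)

lemma pvScan_eq_head (cs : List (List Int)) (k : Int) :
    pvScan cs k = (pvCollect cs k).head? := by
  induction cs generalizing k with
  | nil => rfl
  | cons c r ih => simp only [pvScan, pvCollect]; split <;> simp [ih]

lemma pvCollect_succ (cs : List (List Int)) (k : Int) :
    pvCollect cs (k + 1) = (pvCollect cs k).map (· + 1) := by
  induction cs generalizing k with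
  | nil => rfl
  | cons c r ih => simp only [pvCollect]; split <;> simp [ih (k + 1)]

lemma pvCollect_append (xs ys : List (List Int)) (k : Int) :
    pvCollect (xs ++ ys) k = pvCollect xs k ++ pvCollect ys (k + xs.length) := by
  induction xs generalizing k with
  | nil => simp [pvCollect]
  | cons c r ih =>
    simp only [List.cons_append, pvCollect, ih (k + 1)]
    split <;> simp <;> ring_nf

lemma pvCollect_reverse (cs : List (List Int)) (k : Int) :
    pvCollect cs.reverse k
      = ((pvCollect cs k).map (fun j => 2 * k + cs.length - 1 - j)).reverse := by
  induction cs generalizing k with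
  | nil => rfl
  | cons c r ih =>
    have hsh := pvCollect_succ r k
    simp only [List.reverse_cons, pvCollect_append, ih k, pvCollect]
    split <;> simp [hsh, List.map_map, Function.comp]
    · exact ⟨fun a _ => by omega, by omega⟩
    · intro a _; omega

-- pvCollect over a range-map of columns = the filtered range, cast to Int
lemma pvCollect_rangeMap (col : Nat → List Int) (n : Nat) :
    pvCollect ((List.range n).map col) 0
      = ((List.range n).filter (fun i => PySem.Set.len (PySem.Set.ofList (col i)) != 1)).map
          (Nat.cast : Nat → Int) := by
  induction n with
  | zero => rfl
  | succ n ih =>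
    rw [List.range_succ, List.map_append, pvCollect_append, ih]
    simp only [List.filter_append, List.map_append]
    congr 1
    simp only [List.length_map, List.length_range]
    by_cases h : (PySem.Set.len (PySem.Set.ofList (col n)) != 1) = true
    · have hlen : List.length (PySem.Set.ofList (col n)) ≠ 1 := by
        simp only [PySem.Set.len, bne_iff_ne, ne_eq] at h
        exact_mod_cast h
      simp [pvCollect, hlen]
    · have hlen : List.length (PySem.Set.ofList (col n)) = 1 := by
        simp only [PySem.Set.len, bne_iff_ne, ne_eq, not_not] at h
        exact_mod_cast h
      simp [pvCollect, hlen]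

-- set of a nonempty column has size 1 iff every entry equals the head
lemma setlen_one_iff (a : Int) (l : List Int) :
    PySem.Set.len (PySem.Set.ofList (a :: l)) = 1 ↔ ∀ x ∈ l, x = a := by
  have hmem := fun y => PySem.Set.mem_ofList (a :: l) y
  have hnd := PySem.Set.nodup_ofList (a :: l)
  unfold PySem.Set.len
  constructor
  · intro h x hx
    obtain ⟨y, hy⟩ := List.length_eq_one_iff.mp (by exact_mod_cast h)
    have ha : a ∈ PySem.Set.ofList (a :: l) := (hmem a).mpr (by simp)
    have hxs : x ∈ PySem.Set.ofList (a :: l) := (hmem x).mpr (by simp [hx])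
    rw [hy] at ha hxs
    simp at ha hxs
    rw [hxs, ha]
  · intro h
    have ha : a ∈ PySem.Set.ofList (a :: l) := (hmem a).mpr (by simp)
    have hall : ∀ x ∈ PySem.Set.ofList (a :: l), x = a := by
      intro x hx
      rcases List.mem_cons.mp ((hmem x).mp hx) with h1 | h2
      · exact h1
      · exact h x h2
    cases hs : PySem.Set.ofList (a :: l) with
    | nil => rw [hs] at ha; simp at ha
    | cons y ys =>
      cases ys with
      | nil => simp
      | cons z zs =>
        exfalso
        have hy : y = a := hall y (by rw [hs]; simp)
        have hz : z = a := hall z (by rw [hs]; simp)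
        rw [hs] at hnd
        rcases List.nodup_cons.mp hnd with ⟨hny, _⟩
        exact hny (by rw [hy, hz]; simp)

-- strictly increasing lists: head is the minimum, last is the maximum
lemma head?_eq_min? (xs : List Int) (h : xs.Pairwise (· < ·)) : xs.min? = xs.head? := by
  cases xs with
  | nil => rfl
  | cons a t =>
    rw [List.head?_cons]
    apply List.min?_eq_some_iff.mpr
    refine ⟨by simp, ?_⟩
    intro b hb
    rcases List.mem_cons.mp hb with rfl | hbt
    · exact le_refl _
    · exact le_of_lt (List.rel_of_pairwise_cons h hbt)

lemma le_getLast_of_sorted (xs : List Int) (h : xs.Pairwise (· < ·)) (hne : xs ≠ []) :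
    ∀ b ∈ xs, b ≤ xs.getLast hne := by
  induction xs with
  | nil => simp
  | cons a t ih =>
    intro b hb
    cases t with
    | nil => simp at hb; simp [hb, List.getLast]
    | cons c u =>
      rw [List.getLast_cons (by simp)]
      rcases List.mem_cons.mp hb with rfl | hbt
      · exact le_of_lt (List.rel_of_pairwise_cons h (List.getLast_mem _))
      · exact ih (List.pairwise_cons.mp h).2 (by simp) b hbt

lemma getLast?_eq_max? (xs : List Int) (h : xs.Pairwise (· < ·)) : xs.max? = xs.getLast? := by
  cases hx : xs with
  | nil => rfl
  | cons a t =>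
    subst hx
    rw [List.getLast?_eq_some_getLast (by simp)]
    apply List.max?_eq_some_iff.mpr
    exact ⟨List.getLast_mem _, le_getLast_of_sorted _ h (by simp)⟩

-- extrema are determined by membership alone
lemma min?_congr_mem (xs ys : List Int) (h : ∀ x, x ∈ xs ↔ x ∈ ys) : xs.min? = ys.min? := by
  cases hx : xs.min? with
  | none =>
    have : xs = [] := List.min?_eq_none_iff.mp hx
    subst this
    have : ys = [] := List.eq_nil_iff_forall_not_mem.mpr (fun x hxy => by simp [← h x] at hxy)
    simp [this]
  | some a =>
    rcases List.min?_eq_some_iff.mp hx with ⟨hmem, hle⟩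
    exact (List.min?_eq_some_iff.mpr ⟨(h a).mp hmem, fun b hb => hle b ((h b).mpr hb)⟩).symm

lemma max?_congr_mem (xs ys : List Int) (h : ∀ x, x ∈ xs ↔ x ∈ ys) : xs.max? = ys.max? := by
  cases hx : xs.max? with
  | none =>
    have : xs = [] := List.max?_eq_none_iff.mp hx
    subst this
    have : ys = [] := List.eq_nil_iff_forall_not_mem.mpr (fun x hxy => by simp [← h x] at hxy)
    simp [this]
  | some a =>
    rcases List.max?_eq_some_iff.mp hx with ⟨hmem, hle⟩
    exact (List.max?_eq_some_iff.mpr ⟨(h a).mp hmem, fun b hb => hle b ((h b).mpr hb)⟩).symm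

-- B-side: the min/max accumulator steps, isolated
def pvOMin (o : Option Int) (i : Nat) : Option Int :=
  match o with
  | none => some (i : Int)
  | some f => if (i : Int) < f then some (i : Int) else some f

def pvOMax (o : Option Int) (i : Nat) : Option Int :=
  match o with
  | none => some (i : Int)
  | some l => if (i : Int) > l then some (i : Int) else some l

lemma pvOMin_some (v : Int) (a : Nat) : pvOMin (some v) a = some (min v (a : Int)) := by
  simp only [pvOMin]
  split_ifs <;> simp only [Option.some.injEq] <;> omega

lemma pvOMax_some (v : Int) (a : Nat) : pvOMax (some v) a = some (max v (a : Int)) := by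
  simp only [pvOMax]
  split_ifs <;> simp only [Option.some.injEq] <;> omega

lemma foldl_pair_filter (p : Nat → Bool) (xs : List Nat) (fl : Option Int × Option Int) :
    xs.foldl (fun fl i => if p i then (pvOMin fl.1 i, pvOMax fl.2 i) else fl) fl
      = ((xs.filter p).foldl pvOMin fl.1, (xs.filter p).foldl pvOMax fl.2) := by
  induction xs generalizing fl with
  | nil => rfl
  | cons a t ih =>
    by_cases h : p a <;> simp [h, ih]

lemma pvInner_eq (ref s : List Int) (m : Nat) (fl : Option Int × Option Int) :
    pvInner ref s m fl
      = (((List.range m).filter (fun i => s.getD i 0 != ref.getD i 0)).foldl pvOMin fl.1,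
         ((List.range m).filter (fun i => s.getD i 0 != ref.getD i 0)).foldl pvOMax fl.2) := by
  unfold pvInner
  exact foldl_pair_filter _ _ fl

lemma foldl_inner (ref : List Int) (m : Nat) (rows : List (List Int))
    (fl : Option Int × Option Int) :
    rows.foldl (fun fl s => pvInner ref s m fl) fl
      = ((rows.flatMap (fun s => (List.range m).filter (fun i => s.getD i 0 != ref.getD i 0))).foldl pvOMin fl.1,
         (rows.flatMap (fun s => (List.range m).filter (fun i => s.getD i 0 != ref.getD i 0))).foldl pvOMax fl.2) := by
  induction rows generalizing fl with
  | nil => simp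
  | cons r rs ih =>
    rw [List.foldl_cons, pvInner_eq, ih, List.flatMap_cons, List.foldl_append, List.foldl_append]

lemma foldl_pvOMin_some (xs : List Nat) (v : Int) :
    xs.foldl pvOMin (some v) = some (xs.foldl (fun (f : Int) (i : Nat) => min f (i : Int)) v) := by
  induction xs generalizing v with
  | nil => rfl
  | cons a t ih =>
    simp only [List.foldl_cons, pvOMin_some]
    exact ih _

lemma foldl_pvOMax_some (xs : List Nat) (v : Int) :
    xs.foldl pvOMax (some v) = some (xs.foldl (fun (f : Int) (i : Nat) => max f (i : Int)) v) := by
  induction xs generalizing v with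
  | nil => rfl
  | cons a t ih =>
    simp only [List.foldl_cons, pvOMax_some]
    exact ih _

lemma foldl_pvOMin_none (xs : List Nat) :
    xs.foldl pvOMin none = (xs.map (Nat.cast : Nat → Int)).min? := by
  cases xs with
  | nil => rfl
  | cons a t =>
    rw [List.foldl_cons, List.map_cons,
      show (((a : Int)) :: t.map (Nat.cast : Nat → Int)).min?
          = some ((t.map (Nat.cast : Nat → Int)).foldl min (a : Int)) from rfl,
      List.foldl_map]
    exact foldl_pvOMin_some t a

lemma foldl_pvOMax_none (xs : List Nat) :
    xs.foldl pvOMax none = (xs.map (Nat.cast : Nat → Int)).max? := by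
  cases xs with
  | nil => rfl
  | cons a t =>
    rw [List.foldl_cons, List.map_cons,
      show (((a : Int)) :: t.map (Nat.cast : Nat → Int)).max?
          = some ((t.map (Nat.cast : Nat → Int)).foldl max (a : Int)) from rfl,
      List.foldl_map]
    exact foldl_pvOMax_some t a

-- ===== VERDICT (by name: the statement is the Claim_ definition above) =====
theorem find_changes_region_spec : Claim_equal_find_changes_region := by
  intro seqs _ hpre
  unfold Spec_find_changes_region
  obtain ⟨i0, hi0, s0, hs0, hd0⟩ := hpre
  cases seqs with
  | nil => simp at hs0
  | cons hd tl =>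
    set m := pvMinLen (hd :: tl) with hm
    set D : Nat → Bool :=
      fun i => PySem.Set.len (PySem.Set.ofList ((hd :: tl).map (fun s => s.getD i 0))) != 1 with hDdef
    set L : List Int := ((List.range m).filter D).map (Nat.cast : Nat → Int) with hL
    -- a differing column means: some non-reference row differs from the reference row
    have hDiff : ∀ i : Nat, D i = true ↔ ∃ s ∈ tl, s.getD i 0 ≠ hd.getD i 0 := by
      intro i
      rw [hDdef]
      simp only [List.map_cons, bne_iff_ne, ne_eq, setlen_one_iff]
      push Not
      constructor
      · rintro ⟨x, hx, hxa⟩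
        rcases List.mem_map.mp hx with ⟨s, hs, rfl⟩
        exact ⟨s, hs, hxa⟩
      · rintro ⟨s, hs, hsa⟩
        exact ⟨s.getD i 0, List.mem_map.mpr ⟨s, hs, rfl⟩, hsa⟩
    -- L is nonempty (from Pre_)
    have hi0m : i0 < m := List.mem_range.mp hi0
    have hmemL : (i0 : Int) ∈ L := by
      rw [hL]
      apply List.mem_map.mpr
      refine ⟨i0, List.mem_filter.mpr ⟨List.mem_range.mpr hi0m, ?_⟩, rfl⟩
      apply (hDiff i0).mpr
      rcases List.mem_cons.mp hs0 with rfl | hs0t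
      · simp at hd0
      · exact ⟨s0, hs0t, by simpa using hd0⟩
    have hLne : L ≠ [] := fun h => by rw [h] at hmemL; simp at hmemL
    -- L is strictly increasing
    have hLp : L.Pairwise (· < ·) := by
      rw [hL]
      refine List.pairwise_map.mpr
        ((List.Pairwise.sublist List.filter_sublist List.pairwise_lt_range).imp ?_)
      intro a b hab
      exact_mod_cast hab
    obtain ⟨a0, t0, hLc⟩ := List.exists_cons_of_ne_nil hLne
    have hf : L.head? = some a0 := by rw [hLc]; rfl
    obtain ⟨g, hg⟩ : ∃ g, L.getLast? = some g := by
      rw [hLc]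
      exact ⟨_, List.getLast?_eq_some_getLast (by simp)⟩
    -- A's two scans
    have hcols : pvZipStar (hd :: tl)
        = (List.range m).map (fun i => (hd :: tl).map (fun s => s.getD i 0)) := rfl
    have hColl : pvCollect (pvZipStar (hd :: tl)) 0 = L := by
      rw [hcols, pvCollect_rangeMap, hL, hDdef]
    have hA1 : pvScan (pvZipStar (hd :: tl)) 0 = some a0 := by
      rw [pvScan_eq_head, hColl, hf]
    have hA2 : pvScan (pvZipStar (hd :: tl)).reverse 0 = some ((m : Int) - 1 - g) := by
      rw [pvScan_eq_head, pvCollect_reverse, hColl, List.head?_reverse, List.getLast?_map, hg,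
        Option.map_some]
      simp only [hcols, List.length_map, List.length_range, Option.some.injEq]
      omega
    -- B's fold computes (min, max) of the very same set of indices
    have hMem : ∀ x : Int,
        x ∈ (tl.flatMap (fun s => (List.range m).filter
              (fun i => s.getD i 0 != hd.getD i 0))).map (Nat.cast : Nat → Int) ↔ x ∈ L := by
      intro x
      rw [hL]
      simp only [List.mem_map, List.mem_flatMap, List.mem_filter, List.mem_range]
      constructor
      · rintro ⟨i, ⟨s, hs, him, hne⟩, rfl⟩
        exact ⟨i, ⟨him, (hDiff i).mpr ⟨s, hs, by simpa using hne⟩⟩, rfl⟩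
      · rintro ⟨i, ⟨him, hDi⟩, rfl⟩
        rcases (hDiff i).mp hDi with ⟨s, hs, hne⟩
        exact ⟨i, ⟨s, hs, him, by simpa using hne⟩, rfl⟩
    have hB : tl.foldl (fun fl s => pvInner hd s m fl) (none, none) = (some a0, some g) := by
      rw [foldl_inner, foldl_pvOMin_none, foldl_pvOMax_none,
          min?_congr_mem _ L hMem, max?_congr_mem _ L hMem,
          head?_eq_min? L hLp, getLast?_eq_max? L hLp, hf, hg]
    -- assemble
    simp only [find_changes_region, find_changes_region_alt, List.headD_cons, List.tailD_cons]
    rw [← hm]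
    rw [hA1, hA2, hB]
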